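-- pv_equiv track=rewrite | github.com/angelotc/mostVisitedNode | mostVisitedNode.py | mostVisitedNode
-- ===== SOURCE A (Python) =====
-- def mostVisitedNode(N, L):
--     '''
--     Parameters:
--     N =  number of nodes in the circular array (int)
--     L = nodes visited ( List[int] )
--     -------------
--     Returns :
--     the node that was visited the most
--     '''
--     base_list = list(range(1,N+1))
--     # N = 10 ---> base_list = [1, 2, 3, 4, 5, 6, 7, 8, 9, 10]
--     path = []
--     counts = [0]*N
--
--     for i in range(len(L)-1):
--         start = L[i]
--         end = L[i+1]
--
--         # First pass, include the start node
--         if i == 0: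
--             if start > end:
--                 cur_path = base_list[start-1:]+ base_list[:end]
--             else:
--                 cur_path = base_list[start-1:end]
--             path += cur_path
--         # All proceeding paths, exclude the start node
--         else:
--             if start >= end:
--                 cur_path = base_list[start:]+ base_list[:end]
--             else:
--                 cur_path = base_list[start:end]
--             path += cur_path
--
--      #        L[0]-->L[1]-------------------->L[2] ------------------------>L[3]
--      # path = [3, 4, 5, 6, 7, 8, 9, 10, 1, 2, 3, 4, 5, 6, 7, 8, 9, 10, 1, 2, 3]
--
--     for i in path:
--         counts[i-1] += 1
--     max_index = 0
--     max_so_far = 0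
--     for i in range(len(counts)):
--         if counts[i] >= max_so_far:
--             max_so_far = counts[i]
--             max_index = i + 1
--     return max_index
-- ===== SOURCE B (Python) =====
-- def mostVisitedNode(N, L):
--     '''
--     Parameters:
--     N =  number of nodes in the circular array (int)
--     L = nodes visited ( List[int] )
--     -------------
--     Returns :
--     the node that was visited the most
--     '''
--     # Difference array over the node positions: every visited slice of the
--     # circle contributes +1/-1 at its boundaries; one prefix-sum pass then
--     # recovers each node's visit count and the argmax.
--     diff = [0] * (N + 1)
--
--     def mark(sl):
--         # one more visit to the nodes selected by slice sl of [1..N]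
--         lo, hi, _ = sl.indices(N)
--         if lo < hi:
--             diff[lo] += 1
--             diff[hi] -= 1
--
--     for i in range(len(L) - 1):
--         start, end = L[i], L[i + 1]
--         first = i == 0
--         a = start - 1 if first else start   # the first segment includes its start node
--         if (start > end) if first else (start >= end):
--             mark(slice(a, None))
--             mark(slice(None, end))
--         else:
--             mark(slice(a, end))
--
--     best = 0
--     best_count = 0
--     running = 0
--     for i in range(N):
--         running += diff[i]
--         if running >= best_count:
--             best_count = running
--             best = i + 1
--     return best
-- ===== Notes on version B (the rewrite author's own statement) =====
-- stated objective: faster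
-- what changed: Instead of materialising every visited segment as an explicit list of nodes and counting them one by one, B records each visited slice as +1/-1 boundary marks (via slice.indices) in a difference array and recovers all visit counts and the argmax (same last-index tie-breaking) in one prefix-sum pass; Pre_ only excludes N < 0 with at least two visited nodes, where slice.indices rejects the negative length (ValueError) while A returns 0 from empty slices.
-- outside the precondition, e.g. on mostVisitedNode(-2, [1, 2]): A returns 0, B raises ValueError
import Mathlib
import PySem

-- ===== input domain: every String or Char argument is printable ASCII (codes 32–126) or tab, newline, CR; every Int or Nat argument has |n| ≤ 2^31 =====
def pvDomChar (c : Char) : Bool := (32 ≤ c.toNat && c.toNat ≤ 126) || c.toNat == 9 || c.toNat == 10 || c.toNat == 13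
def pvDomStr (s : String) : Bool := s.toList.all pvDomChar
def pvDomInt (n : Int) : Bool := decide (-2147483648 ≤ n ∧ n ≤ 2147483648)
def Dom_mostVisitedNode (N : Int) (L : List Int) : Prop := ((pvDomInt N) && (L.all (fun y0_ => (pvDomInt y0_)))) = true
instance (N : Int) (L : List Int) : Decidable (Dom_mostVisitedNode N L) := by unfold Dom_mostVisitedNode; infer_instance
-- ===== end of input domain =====

-- B replaces A's explicit path-building (materialising every segment as a list
-- of nodes) by a difference array with one +1/-1 mark per visited slice and a
-- single prefix-sum/argmax pass; objective: faster.

-- ===== PORT A =====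
def mostVisitedNode (N : Int) (L : List Int) : Int :=
  let base := PySem.List.pyRange 1 (N + 1) 1
  let path : List Int :=
    (PySem.List.pyRange 0 (PySem.List.len L - 1) 1).foldl (fun path i =>
      let start := PySem.List.pyGetD L i 0
      let endv := PySem.List.pyGetD L (i + 1) 0
      if i == 0 then
        let cur := if start > endv then
            PySem.List.slice base (some (start - 1)) none ++ PySem.List.slice base none (some endv)
          else PySem.List.slice base (some (start - 1)) (some endv)
        path ++ cur
      else
        let cur := if start ≥ endv then
            PySem.List.slice base (some start) none ++ PySem.List.slice base none (some endv)
          else PySem.List.slice base (some start) (some endv)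
        path ++ cur) []
  let counts0 : List Int := List.replicate N.toNat 0
  let counts := path.foldl
    (fun c v => PySem.List.pySetD c (v - 1) (PySem.List.pyGetD c (v - 1) 0 + 1)) counts0
  let r := (PySem.List.pyRange 0 (PySem.List.len counts) 1).foldl
    (fun (st : Int × Int) i =>
      if PySem.List.pyGetD counts i 0 ≥ st.2 then (i + 1, PySem.List.pyGetD counts i 0) else st)
    (0, 0)
  r.1

-- ===== PORT B =====
-- slice(a, b).indices(N) for step 1 and length N ≥ 0: PySem.List.clampIdx is
-- exactly Python's slice-bound resolution (exact on 0 ≤ N, the only case B reaches)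
def pvIndices (N : Int) (a b : Option Int) : Int × Int :=
  ((match a with
    | none => 0
    | some a => ((PySem.List.clampIdx N.toNat a : Nat) : Int)),
   (match b with
    | none => N
    | some b => ((PySem.List.clampIdx N.toNat b : Nat) : Int)))

-- Source B's mark: one more visit to the nodes selected by the slice (a, b)
def pvMark (N : Int) (diff : List Int) (a b : Option Int) : List Int :=
  if (pvIndices N a b).1 < (pvIndices N a b).2 then
    PySem.List.pySetD
      (PySem.List.pySetD diff (pvIndices N a b).1
        (PySem.List.pyGetD diff (pvIndices N a b).1 0 + 1))
      (pvIndices N a b).2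
      (PySem.List.pyGetD
        (PySem.List.pySetD diff (pvIndices N a b).1
          (PySem.List.pyGetD diff (pvIndices N a b).1 0 + 1))
        (pvIndices N a b).2 0 - 1)
  else diff

def mostVisitedNode_alt (N : Int) (L : List Int) : Int :=
  let diff := (PySem.List.pyRange 0 (PySem.List.len L - 1) 1).foldl (fun diff i =>
    let start := PySem.List.pyGetD L i 0
    let endv := PySem.List.pyGetD L (i + 1) 0
    let a := if i == 0 then start - 1 else start
    if (if i == 0 then start > endv else start ≥ endv) then
      pvMark N (pvMark N diff (some a) none) none (some endv)
    else pvMark N diff (some a) (some endv)) (List.replicate (N + 1).toNat 0)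
  let r := (PySem.List.pyRange 0 N 1).foldl
    (fun (st : Int × Int × Int) i =>
      let running := st.2.2 + PySem.List.pyGetD diff i 0
      if running ≥ st.2.1 then (i + 1, running, running) else (st.1, st.2.1, running))
    (0, 0, 0)
  r.1

-- ===== PRECONDITION & SPEC =====
-- Pre_ excludes only N < 0 together with at least two visited nodes: there
-- slice.indices rejects the negative length (ValueError) in B, while A
-- returns 0 from slices of an empty base list.
def Pre_mostVisitedNode (N : Int) (L : List Int) : Prop :=
  0 ≤ N ∨ L.length < 2
instance (N : Int) (L : List Int) : Decidable (Pre_mostVisitedNode N L) := by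
  unfold Pre_mostVisitedNode; infer_instance
def pvWitness_mostVisitedNode : Int × List Int := (3, [1, 3, 2])

def Spec_mostVisitedNode (N : Int) (L : List Int) (out : Int) : Prop := out = mostVisitedNode_alt N L
instance (N : Int) (L : List Int) (out : Int) : Decidable (Spec_mostVisitedNode N L out) := by unfold Spec_mostVisitedNode; infer_instance

-- ===== CLAIM (what is proved, stated in full; the proofs are below) =====
def Claim_equal_mostVisitedNode : Prop := ∀ (N : Int) (L : List Int), Dom_mostVisitedNode N L → Pre_mostVisitedNode N L → Spec_mostVisitedNode N L (mostVisitedNode N L)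

-- ===== LEMMAS AND PROOFS =====
lemma drop_pyRange_one (a b : Int) (k : Nat) :
    (PySem.List.pyRange a b 1).drop k = PySem.List.pyRange (a + k) b 1 := by
  apply List.ext_getElem
  · simp [PySem.List.length_pyRange_one]; omega
  · intro i h1 h2
    simp [PySem.List.getElem_pyRange_one]
    ring

lemma take_pyRange_one (a b : Int) (k : Nat) :
    (PySem.List.pyRange a b 1).take k = PySem.List.pyRange a (min b (a + k)) 1 := by
  apply List.ext_getElem
  · simp [PySem.List.length_pyRange_one]; omega
  · intro i h1 h2
    simp [PySem.List.getElem_pyRange_one]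

lemma count_pyRange_one (a b v : Int) :
    (((PySem.List.pyRange a b 1).count v : Nat) : Int) = if a ≤ v ∧ v < b then 1 else 0 := by
  by_cases h : a ≤ v ∧ v < b
  · rw [List.count_eq_one_of_mem (PySem.List.nodup_pyRange_one a b)
      ((PySem.List.mem_pyRange_one).2 h)]
    simp [h]
  · rw [List.count_eq_zero_of_not_mem]
    · simp [h]
    · rw [PySem.List.mem_pyRange_one]; exact h

lemma sum_take_set (d : List Int) (k m : Nat) (δ : Int) (hk : k < d.length) :
    ((d.set k (d.getD k 0 + δ)).take m).sum = (d.take m).sum + if k < m then δ else 0 := by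
  induction d generalizing k m with
  | nil => simp at hk
  | cons x xs ih =>
    cases k with
    | zero =>
      cases m with
      | zero => simp
      | succ m => simp [List.sum_cons]; ring
    | succ k =>
      cases m with
      | zero => simp
      | succ m =>
        simp only [List.set_cons_succ, List.take_succ_cons, List.sum_cons, List.getD_cons_succ]
        rw [ih k m (by simpa using hk)]
        split_ifs <;> omega

lemma indices_bounds (N : Int) (a b : Option Int) (hN : 0 ≤ N) :
    0 ≤ (pvIndices N a b).1 ∧ (pvIndices N a b).1 ≤ N ∧
      0 ≤ (pvIndices N a b).2 ∧ (pvIndices N a b).2 ≤ N := by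
  cases a with
  | none =>
    cases b with
    | none => simp only [pvIndices]; omega
    | some b => simp only [pvIndices]; have := PySem.List.clampIdx_le N.toNat b; omega
  | some a =>
    cases b with
    | none => simp only [pvIndices]; have := PySem.List.clampIdx_le N.toNat a; omega
    | some b =>
      simp only [pvIndices]
      have h1 := PySem.List.clampIdx_le N.toNat a
      have h2 := PySem.List.clampIdx_le N.toNat b
      omega

lemma length_pvMark (N : Int) (d : List Int) (a b : Option Int) :
    (pvMark N d a b).length = d.length := by
  unfold pvMark
  split_ifs
  · simp [PySem.List.length_pySetD]
  · rfl

-- one mark: its effect on every prefix sum of the difference array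
lemma pvMark_sum_take (N : Int) (hN : 0 ≤ N) (d : List Int) (hd : d.length = (N + 1).toNat)
    (a b : Option Int) (m : Nat) :
    ((pvMark N d a b).take m).sum
      = (d.take m).sum +
        if (pvIndices N a b).1 < (m : Int) ∧ (m : Int) ≤ (pvIndices N a b).2 then 1 else 0 := by
  obtain ⟨hlo0, hloN, hhi0, hhiN⟩ := indices_bounds N a b hN
  set lo := (pvIndices N a b).1
  set hi := (pvIndices N a b).2
  unfold pvMark
  split_ifs with hlt h2 h2
  · have hlo' : lo.toNat < d.length := by omega
    have hhi' : hi.toNat < d.length := by omega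
    rw [PySem.List.pySetD_of_nonneg _ _ hlo0, PySem.List.pyGetD_eq_getElem _ _ hlo0 (by omega)]
    rw [← List.getD_eq_getElem _ 0]
    rw [PySem.List.pySetD_of_nonneg _ _ hhi0,
      PySem.List.pyGetD_eq_getElem _ _ hhi0 (by simp only [List.length_set]; omega)]
    rw [← List.getD_eq_getElem _ 0]
    rw [show ∀ x : Int, x - 1 = x + (-1) from fun x => by ring]
    rw [sum_take_set (d.set lo.toNat (d.getD lo.toNat 0 + 1)) hi.toNat m (-1) (by simpa using hhi'),
      sum_take_set d lo.toNat m 1 hlo']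
    split_ifs <;> omega
  · -- hlt but the prefix condition fails: the +1 and -1 cancel in this prefix
    have hlo' : lo.toNat < d.length := by omega
    have hhi' : hi.toNat < d.length := by omega
    rw [PySem.List.pySetD_of_nonneg _ _ hlo0, PySem.List.pyGetD_eq_getElem _ _ hlo0 (by omega)]
    rw [← List.getD_eq_getElem _ 0]
    rw [PySem.List.pySetD_of_nonneg _ _ hhi0,
      PySem.List.pyGetD_eq_getElem _ _ hhi0 (by simp only [List.length_set]; omega)]
    rw [← List.getD_eq_getElem _ 0]
    rw [show ∀ x : Int, x - 1 = x + (-1) from fun x => by ring]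
    rw [sum_take_set (d.set lo.toNat (d.getD lo.toNat 0 + 1)) hi.toNat m (-1) (by simpa using hhi'),
      sum_take_set d lo.toNat m 1 hlo']
    split_ifs <;> omega
  · omega
  · simp

lemma base_length (N : Int) : (PySem.List.pyRange 1 (N + 1) 1).length = N.toNat := by
  rw [PySem.List.length_pyRange_one]; omega

lemma count_slice_from (N a : Int) (j : Nat) (hj : j < N.toNat) :
    (((PySem.List.slice (PySem.List.pyRange 1 (N + 1) 1) (some a) none).count ((j : Int) + 1) : Nat) : Int)
      = if ((PySem.List.clampIdx N.toNat a : Nat) : Int) ≤ (j : Int) then 1 else 0 := by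
  rw [PySem.List.slice_some_none, base_length, drop_pyRange_one, count_pyRange_one]
  split_ifs <;> omega

lemma count_slice_to (N b : Int) (j : Nat) (hj : j < N.toNat) :
    (((PySem.List.slice (PySem.List.pyRange 1 (N + 1) 1) none (some b)).count ((j : Int) + 1) : Nat) : Int)
      = if (j : Int) < ((PySem.List.clampIdx N.toNat b : Nat) : Int) then 1 else 0 := by
  simp only [PySem.List.slice, base_length, Nat.sub_zero, List.drop_zero]
  rw [take_pyRange_one, count_pyRange_one]
  split_ifs <;> omega

lemma count_slice_both (N a b : Int) (j : Nat) (hj : j < N.toNat) :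
    (((PySem.List.slice (PySem.List.pyRange 1 (N + 1) 1) (some a) (some b)).count ((j : Int) + 1) : Nat) : Int)
      = if ((PySem.List.clampIdx N.toNat a : Nat) : Int) ≤ (j : Int) ∧
           (j : Int) < ((PySem.List.clampIdx N.toNat b : Nat) : Int) then 1 else 0 := by
  simp only [PySem.List.slice, base_length]
  rw [drop_pyRange_one, take_pyRange_one, count_pyRange_one]
  split_ifs <;> omega

lemma countsFold_length (path cs : List Int) :
    (path.foldl (fun c v => PySem.List.pySetD c (v - 1) (PySem.List.pyGetD c (v - 1) 0 + 1)) cs).length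
      = cs.length := by
  induction path generalizing cs with
  | nil => rfl
  | cons v t ih =>
    simp only [List.foldl_cons]
    rw [ih, PySem.List.length_pySetD]

lemma countsFold_getD (path : List Int) (cs : List Int)
    (h : ∀ v ∈ path, 1 ≤ v ∧ v ≤ (cs.length : Int)) (j : Nat) :
    (path.foldl (fun c v => PySem.List.pySetD c (v - 1) (PySem.List.pyGetD c (v - 1) 0 + 1)) cs).getD j 0
      = cs.getD j 0 + ((path.count ((j : Int) + 1) : Nat) : Int) := by
  induction path generalizing cs with
  | nil => simp
  | cons v t ih =>
    have hv := h v List.mem_cons_self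
    have hk : (v - 1).toNat < cs.length := by omega
    simp only [List.foldl_cons]
    rw [PySem.List.pySetD_of_nonneg _ _ (by omega),
      PySem.List.pyGetD_eq_getElem _ _ (by omega) (by omega), ← List.getD_eq_getElem _ 0]
    rw [ih _ (fun w hw => by
      have := h w (List.mem_cons_of_mem _ hw)
      simpa [List.length_set] using this)]
    rw [List.count_cons]
    have hset : (cs.set (v-1).toNat (cs.getD (v-1).toNat 0 + 1)).getD j 0
        = cs.getD j 0 + if v = (j : Int) + 1 then 1 else 0 := by
      by_cases hvj : v = (j : Int) + 1
      · have : (v - 1).toNat = j := by omega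
        rw [List.getD_eq_getElem?_getD, List.getElem?_set, if_pos this, if_pos (by omega)]
        rw [if_pos hvj, this, Option.getD_some, List.getD_eq_getElem _ _ (by omega)]
      · have : (v - 1).toNat ≠ j := by omega
        rw [List.getD_eq_getElem?_getD, List.getElem?_set, if_neg this, if_neg hvj,
          ← List.getD_eq_getElem?_getD]
        ring
    rw [hset]
    by_cases hvj : v = (j : Int) + 1
    · simp [hvj]
      ring
    · simp [hvj]

-- one wrapping segment: B's two marks count exactly A's two slices
lemma step_sum_wrap (N : Int) (hN : 0 ≤ N) (s e : Int) (d : List Int)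
    (hd : d.length = (N + 1).toNat) (j : Nat) (hj : j < N.toNat) :
    ((pvMark N (pvMark N d (some s) none) none (some e)).take (j + 1)).sum
      = (d.take (j + 1)).sum +
        (((PySem.List.slice (PySem.List.pyRange 1 (N + 1) 1) (some s) none ++
           PySem.List.slice (PySem.List.pyRange 1 (N + 1) 1) none (some e)).count
           ((j : Int) + 1) : Nat) : Int) := by
  rw [List.count_append]
  rw [pvMark_sum_take N hN _ (by rw [length_pvMark]; exact hd) none (some e) (j + 1),
    pvMark_sum_take N hN d hd (some s) none (j + 1)]
  push_cast
  rw [count_slice_from N s j hj, count_slice_to N e j hj]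
  simp only [pvIndices]
  have := PySem.List.clampIdx_le N.toNat s
  have := PySem.List.clampIdx_le N.toNat e
  split_ifs <;> omega

-- one non-wrapping segment: B's mark counts exactly A's slice
lemma step_sum_nowrap (N : Int) (hN : 0 ≤ N) (s e : Int) (d : List Int)
    (hd : d.length = (N + 1).toNat) (j : Nat) (hj : j < N.toNat) :
    ((pvMark N d (some s) (some e)).take (j + 1)).sum
      = (d.take (j + 1)).sum +
        (((PySem.List.slice (PySem.List.pyRange 1 (N + 1) 1) (some s) (some e)).count
           ((j : Int) + 1) : Nat) : Int) := by
  rw [pvMark_sum_take N hN d hd (some s) (some e) (j + 1), count_slice_both N s e j hj]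
  simp only [pvIndices]
  split_ifs <;> omega

-- invariant after the first k segments: the diff length, the range of path
-- values, and counts-of-path = prefix sums of the difference array
lemma seg_inv (N : Int) (L : List Int) (hN : 0 ≤ N) (k : Nat) :
    (((PySem.List.pyRange 0 (k : Int) 1).foldl (fun diff i =>
        let start := PySem.List.pyGetD L i 0
        let endv := PySem.List.pyGetD L (i + 1) 0
        let a := if i == 0 then start - 1 else start
        if (if i == 0 then start > endv else start ≥ endv) then
          pvMark N (pvMark N diff (some a) none) none (some endv)
        else pvMark N diff (some a) (some endv))
        (List.replicate (N + 1).toNat 0)).length = (N + 1).toNat) ∧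
    (∀ v ∈ (PySem.List.pyRange 0 (k : Int) 1).foldl (fun path i =>
        let start := PySem.List.pyGetD L i 0
        let endv := PySem.List.pyGetD L (i + 1) 0
        if i == 0 then
          let cur := if start > endv then
              PySem.List.slice (PySem.List.pyRange 1 (N + 1) 1) (some (start - 1)) none ++
                PySem.List.slice (PySem.List.pyRange 1 (N + 1) 1) none (some endv)
            else PySem.List.slice (PySem.List.pyRange 1 (N + 1) 1) (some (start - 1)) (some endv)
          path ++ cur
        else
          let cur := if start ≥ endv then
              PySem.List.slice (PySem.List.pyRange 1 (N + 1) 1) (some start) none ++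
                PySem.List.slice (PySem.List.pyRange 1 (N + 1) 1) none (some endv)
            else PySem.List.slice (PySem.List.pyRange 1 (N + 1) 1) (some start) (some endv)
          path ++ cur) [], 1 ≤ v ∧ v ≤ N) ∧
    (∀ j : Nat, j < N.toNat →
      ((((PySem.List.pyRange 0 (k : Int) 1).foldl (fun path i =>
        let start := PySem.List.pyGetD L i 0
        let endv := PySem.List.pyGetD L (i + 1) 0
        if i == 0 then
          let cur := if start > endv then
              PySem.List.slice (PySem.List.pyRange 1 (N + 1) 1) (some (start - 1)) none ++
                PySem.List.slice (PySem.List.pyRange 1 (N + 1) 1) none (some endv)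
            else PySem.List.slice (PySem.List.pyRange 1 (N + 1) 1) (some (start - 1)) (some endv)
          path ++ cur
        else
          let cur := if start ≥ endv then
              PySem.List.slice (PySem.List.pyRange 1 (N + 1) 1) (some start) none ++
                PySem.List.slice (PySem.List.pyRange 1 (N + 1) 1) none (some endv)
            else PySem.List.slice (PySem.List.pyRange 1 (N + 1) 1) (some start) (some endv)
          path ++ cur) []).count ((j : Int) + 1) : Nat) : Int)
      = (((PySem.List.pyRange 0 (k : Int) 1).foldl (fun diff i =>
        let start := PySem.List.pyGetD L i 0
        let endv := PySem.List.pyGetD L (i + 1) 0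
        let a := if i == 0 then start - 1 else start
        if (if i == 0 then start > endv else start ≥ endv) then
          pvMark N (pvMark N diff (some a) none) none (some endv)
        else pvMark N diff (some a) (some endv))
        (List.replicate (N + 1).toNat 0)).take (j + 1)).sum) := by
  induction k with
  | zero =>
    refine ⟨by simp, by simp, ?_⟩
    intro j hj
    simp [List.take_replicate]
  | succ k ih =>
    obtain ⟨ihlen, ihmem, ihcnt⟩ := ih
    have hpeel : PySem.List.pyRange 0 ((k + 1 : Nat) : Int) 1
        = PySem.List.pyRange 0 (k : Int) 1 ++ [(k : Int)] := by
      push_cast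
      exact PySem.List.pyRange_one_succ_right (by omega)
    rw [hpeel]
    simp only [List.foldl_append, List.foldl_cons, List.foldl_nil]
    set start := PySem.List.pyGetD L (k : Int) 0 with hstartdef
    set endv := PySem.List.pyGetD L ((k : Int) + 1) 0 with hendvdef
    refine ⟨?_, ?_, ?_⟩
    · split_ifs <;> simp only [length_pvMark] <;> exact ihlen
    · intro v hv
      split_ifs at hv <;>
        (rcases List.mem_append.1 hv with h | h
         · exact ihmem v h
         · first
           | (rcases List.mem_append.1 h with h2 | h2 <;>
              · have := PySem.List.mem_of_mem_slice _ _ _ h2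
                rw [PySem.List.mem_pyRange_one] at this
                omega)
           | (have := PySem.List.mem_of_mem_slice _ _ _ h
              rw [PySem.List.mem_pyRange_one] at this
              omega))
    · intro j hj
      have hc := ihcnt j hj
      by_cases hk0 : (k : Int) = 0
      · have hbeq : ((k : Int) == 0) = true := by simp [hk0]
        simp only [hbeq, if_true]
        rw [List.count_append]
        split_ifs with hw
        · rw [step_sum_wrap N hN (start - 1) endv _ ihlen j hj, List.count_append]
          push_cast
          push_cast at hc
          omega
        · rw [step_sum_nowrap N hN (start - 1) endv _ ihlen j hj]
          push_cast
          push_cast at hc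
          omega
      · have hbeq : ((k : Int) == 0) = false := by
          rw [beq_eq_false_iff_ne]; exact hk0
        simp only [hbeq, Bool.false_eq_true, if_false]
        rw [List.count_append]
        split_ifs with hw
        · rw [step_sum_wrap N hN start endv _ ihlen j hj, List.count_append]
          push_cast
          push_cast at hc
          omega
        · rw [step_sum_nowrap N hN start endv _ ihlen j hj]
          push_cast
          push_cast at hc
          omega

lemma pyRange_zero_toNat (m : Int) :
    PySem.List.pyRange 0 m 1 = PySem.List.pyRange 0 (m.toNat : Int) 1 := by
  simp only [PySem.List.pyRange_one]
  have : ((m.toNat : Int) - 0).toNat = (m - 0).toNat := by omega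
  rw [this]

-- A's argmax over counts equals B's argmax over running prefix sums of diff
lemma argmax_eq (counts diff : List Int) (n : Nat) (hd : n < diff.length)
    (h : ∀ j : Nat, j < n → counts.getD j 0 = (diff.take (j + 1)).sum) :
    ∀ k : Nat, k ≤ n →
      (((PySem.List.pyRange 0 (k : Int) 1).foldl (fun (st : Int × Int) i =>
          if PySem.List.pyGetD counts i 0 ≥ st.2 then (i + 1, PySem.List.pyGetD counts i 0) else st)
          (0, 0)).1
        = ((PySem.List.pyRange 0 (k : Int) 1).foldl (fun (st : Int × Int × Int) i =>
          let running := st.2.2 + PySem.List.pyGetD diff i 0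
          if running ≥ st.2.1 then (i + 1, running, running) else (st.1, st.2.1, running))
          (0, 0, 0)).1) ∧
      (((PySem.List.pyRange 0 (k : Int) 1).foldl (fun (st : Int × Int) i =>
          if PySem.List.pyGetD counts i 0 ≥ st.2 then (i + 1, PySem.List.pyGetD counts i 0) else st)
          (0, 0)).2
        = ((PySem.List.pyRange 0 (k : Int) 1).foldl (fun (st : Int × Int × Int) i =>
          let running := st.2.2 + PySem.List.pyGetD diff i 0
          if running ≥ st.2.1 then (i + 1, running, running) else (st.1, st.2.1, running))
          (0, 0, 0)).2.1) ∧
      ((PySem.List.pyRange 0 (k : Int) 1).foldl (fun (st : Int × Int × Int) i =>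
          let running := st.2.2 + PySem.List.pyGetD diff i 0
          if running ≥ st.2.1 then (i + 1, running, running) else (st.1, st.2.1, running))
          (0, 0, 0)).2.2 = (diff.take k).sum := by
  intro k
  induction k with
  | zero => intro _; simp
  | succ k ih =>
    intro hk
    obtain ⟨ih1, ih2, ih3⟩ := ih (by omega)
    have hpeel : PySem.List.pyRange 0 ((k + 1 : Nat) : Int) 1
        = PySem.List.pyRange 0 (k : Int) 1 ++ [(k : Int)] := by
      push_cast
      exact PySem.List.pyRange_one_succ_right (by omega)
    rw [hpeel]
    simp only [List.foldl_append, List.foldl_cons, List.foldl_nil]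
    set A := (PySem.List.pyRange 0 (k : Int) 1).foldl (fun (st : Int × Int) i =>
        if PySem.List.pyGetD counts i 0 ≥ st.2 then (i + 1, PySem.List.pyGetD counts i 0) else st)
        (0, 0) with hA
    set B := (PySem.List.pyRange 0 (k : Int) 1).foldl (fun (st : Int × Int × Int) i =>
        let running := st.2.2 + PySem.List.pyGetD diff i 0
        if running ≥ st.2.1 then (i + 1, running, running) else (st.1, st.2.1, running))
        (0, 0, 0) with hB
    have hget : PySem.List.pyGetD counts (k : Int) 0 = counts.getD k 0 :=
      PySem.List.pyGetD_natCast counts k 0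
    have hval : B.2.2 + PySem.List.pyGetD diff (k : Int) 0 = counts.getD k 0 := by
      rw [ih3, PySem.List.pyGetD_natCast diff k 0, h k (by omega),
        List.sum_take_succ _ k (by omega), List.getD_eq_getElem _ _ (by omega)]
    simp only [hget, hval, ih2]
    split_ifs with hcond
    · exact ⟨rfl, rfl, h k (by omega)⟩
    · exact ⟨ih1, ih2, h k (by omega)⟩

lemma main_nonneg (N : Int) (L : List Int) (hN : 0 ≤ N) :
    mostVisitedNode N L = mostVisitedNode_alt N L := by
  simp only [mostVisitedNode, mostVisitedNode_alt, PySem.List.len_eq]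
  rw [pyRange_zero_toNat ((L.length : Int) - 1)]
  obtain ⟨hlen, hmem, hcnt⟩ := seg_inv N L hN ((L.length : Int) - 1).toNat
  set pathT := (PySem.List.pyRange 0 ((((L.length : Int) - 1).toNat : Nat) : Int) 1).foldl (fun path i =>
        let start := PySem.List.pyGetD L i 0
        let endv := PySem.List.pyGetD L (i + 1) 0
        if i == 0 then
          let cur := if start > endv then
              PySem.List.slice (PySem.List.pyRange 1 (N + 1) 1) (some (start - 1)) none ++
                PySem.List.slice (PySem.List.pyRange 1 (N + 1) 1) none (some endv)
            else PySem.List.slice (PySem.List.pyRange 1 (N + 1) 1) (some (start - 1)) (some endv)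
          path ++ cur
        else
          let cur := if start ≥ endv then
              PySem.List.slice (PySem.List.pyRange 1 (N + 1) 1) (some start) none ++
                PySem.List.slice (PySem.List.pyRange 1 (N + 1) 1) none (some endv)
            else PySem.List.slice (PySem.List.pyRange 1 (N + 1) 1) (some start) (some endv)
          path ++ cur) [] with hpathT
  set diffT := (PySem.List.pyRange 0 ((((L.length : Int) - 1).toNat : Nat) : Int) 1).foldl (fun diff i =>
        let start := PySem.List.pyGetD L i 0
        let endv := PySem.List.pyGetD L (i + 1) 0
        let a := if i == 0 then start - 1 else start
        if (if i == 0 then start > endv else start ≥ endv) then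
          pvMark N (pvMark N diff (some a) none) none (some endv)
        else pvMark N diff (some a) (some endv))
        (List.replicate (N + 1).toNat (0 : Int)) with hdiffT
  set countsT := pathT.foldl
      (fun c v => PySem.List.pySetD c (v - 1) (PySem.List.pyGetD c (v - 1) 0 + 1))
      (List.replicate N.toNat (0 : Int)) with hcountsT
  have hclen : countsT.length = N.toNat := by
    rw [hcountsT, countsFold_length, List.length_replicate]
  have hcget : ∀ j : Nat, j < N.toNat → countsT.getD j 0 = (diffT.take (j + 1)).sum := by
    intro j hj
    rw [hcountsT, countsFold_getD pathT _ (fun v hv => by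
        have := hmem v hv
        simp only [List.length_replicate]
        omega)]
    have hrep : (List.replicate N.toNat (0 : Int)).getD j 0 = 0 := by
      rw [List.getD_eq_getElem?_getD, List.getElem?_replicate]
      rw [if_pos hj]
      rfl
    rw [hrep, hcnt j hj]
    ring
  rw [hclen, pyRange_zero_toNat N]
  obtain ⟨e1, -, -⟩ := argmax_eq countsT diffT N.toNat (by omega) hcget N.toNat (le_refl _)
  exact e1

-- N < 0 with fewer than two visited nodes: both loops are empty, both return 0
lemma main_neg (N : Int) (L : List Int) (hN : N < 0) (hL : L.length < 2) :
    mostVisitedNode N L = mostVisitedNode_alt N L := by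
  have hrange : PySem.List.pyRange 0 ((L.length : Int) - 1) 1 = [] :=
    PySem.List.pyRange_one_eq_nil (by omega)
  have hcount : PySem.List.pyRange 0 N 1 = [] :=
    PySem.List.pyRange_one_eq_nil (by omega)
  have hN0 : N.toNat = 0 := by omega
  simp only [mostVisitedNode, mostVisitedNode_alt, PySem.List.len_eq, hrange, List.foldl_nil,
    hN0, List.replicate_zero, hcount]
  simp [PySem.List.pyRange_one_eq_nil]

-- ===== VERDICT (by name: the statement is the Claim_ definition above) =====
theorem mostVisitedNode_spec : Claim_equal_mostVisitedNode := by
  intro N L _ hpre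
  unfold Spec_mostVisitedNode
  by_cases hN : 0 ≤ N
  · exact main_nonneg N L hN
  · exact main_neg N L (by omega) (by
      rcases hpre with h | h
      · omega
      · exact h)
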